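-- pv_equiv track=rewrite | github.com/kimyenac/Algorithm | 프로그래머스/1/140108. 문자열 나누기/문자열 나누기.py | solution
-- ===== SOURCE A (Python) =====
-- def solution(s):
--     answer = 0
--     cnt1, cnt2 = 0, 0
--     x = s[0]
--
--     for i in s:
--         if cnt1 == cnt2:
--             answer += 1
--             x = i
--         if i == x:
--             cnt1 += 1
--         else:
--             cnt2 += 1
--
--     return answer
-- ===== SOURCE B (Python) =====
-- def solution(s):
--     answer = 0
--     i = 0
--     n = len(s)
--     while i < n:
--         answer += 1
--         first = s[i]
--         same, diff = 1, 0
--         i += 1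
--         while same != diff and i < n:
--             if s[i] == first:
--                 same += 1
--             else:
--                 diff += 1
--             i += 1
--     return answer
-- ===== Notes on version B (the rewrite author's own statement) =====
-- stated objective: alternative
-- what changed: Replaced A's single flat pass with carried cnt1/cnt2 counters and an in-loop reset by an explicit nested loop over segments, with fresh same/diff counters per segment and one answer increment at each segment start.
-- outside the precondition, e.g. on solution(''): A raises IndexError, B returns 0
-- crash fix: A raises IndexError on the empty string (it reads s[0] before the loop); B returns 0 there. — e.g. on solution(""): A raises IndexError, B returns 0
import Mathlib
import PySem

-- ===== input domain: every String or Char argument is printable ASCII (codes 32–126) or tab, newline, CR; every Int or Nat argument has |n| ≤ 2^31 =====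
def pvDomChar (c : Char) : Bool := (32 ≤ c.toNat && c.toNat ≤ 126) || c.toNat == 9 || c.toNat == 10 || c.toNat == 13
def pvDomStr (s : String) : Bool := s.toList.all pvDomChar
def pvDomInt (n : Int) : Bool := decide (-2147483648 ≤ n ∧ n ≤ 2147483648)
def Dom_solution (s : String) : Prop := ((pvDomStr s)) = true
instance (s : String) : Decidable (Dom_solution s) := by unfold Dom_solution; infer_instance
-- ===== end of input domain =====

-- B restructures A's single flat pass with carried counters into an explicit
-- outer loop over segments with fresh per-segment counters (objective: alternative, same cost).
-- A raises IndexError on the empty string (s[0]); B naturally returns 0 there, so Pre_ excludes it.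

-- ===== PORT A =====
-- one iteration of A's for-loop; state = (answer, cnt1, cnt2, x)
def stepA (st : Int × Int × Int × Char) (i : Char) : Int × Int × Int × Char :=
  let p := if st.2.1 == st.2.2.1 then (st.1 + 1, i) else (st.1, st.2.2.2)
  if i == p.2 then (p.1, st.2.1 + 1, st.2.2.1, p.2)
  else (p.1, st.2.1, st.2.2.1 + 1, p.2)

def solution (s : String) : Int :=
  match PySem.Str.pyGet? s 0 with
  | none => 0   -- Python raises IndexError here; excluded by Pre_solution
  | some x0 => (s.toList.foldl stepA (0, 0, 0, x0)).1

-- ===== PORT B =====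
-- B's inner while-loop: consumes chars of the current segment, returns the rest
def innerB (first : Char) (same diff : Int) : List Char → List Char
  | [] => []
  | c :: rest =>
    if same == diff then c :: rest
    else if c == first then innerB first (same + 1) diff rest
    else innerB first same (diff + 1) rest

theorem innerB_len_le (first : Char) (same diff : Int) (l : List Char) :
    (innerB first same diff l).length ≤ l.length := by
  induction l generalizing same diff with
  | nil => simp [innerB]
  | cons c rest ih =>
    simp only [innerB]
    split
    · simp
    · split <;> exact le_trans (ih _ _) (by simp)

-- B's outer while-loop over segments
def outerB (l : List Char) (answer : Int) : Int :=
  match l with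
  | [] => answer
  | c :: rest => outerB (innerB c 1 0 rest) (answer + 1)
  termination_by l.length
  decreasing_by
    simpa using Nat.lt_succ_of_le (innerB_len_le c 1 0 rest)

def solution_alt (s : String) : Int := outerB s.toList 0

-- ===== PRECONDITION & SPEC =====
-- Pre_ excludes only the empty string, on which A raises IndexError (s[0]).
def Pre_solution (s : String) : Prop := s.toList ≠ []
instance (s : String) : Decidable (Pre_solution s) := by unfold Pre_solution; infer_instance
def pvWitness_solution : String := "aabbaccc"

def Spec_solution (s : String) (out : Int) : Prop := out = solution_alt s
instance (s : String) (out : Int) : Decidable (Spec_solution s out) := by unfold Spec_solution; infer_instance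

-- A raises IndexError on the empty string; B returns 0 there (theorem solution_raises).
def Raises_solution (s : String) : Prop := s.toList = []
instance (s : String) : Decidable (Raises_solution s) := by unfold Raises_solution; infer_instance
def pvRaiseWitness_solution : String := ""
def pvRaiseWitnessOut_solution : Int := 0

-- ===== CLAIM (what is proved, stated in full; the proofs are below) =====
def Claim_equal_solution : Prop := ∀ (s : String), Dom_solution s → Pre_solution s → Spec_solution s (solution s)
def Claim_raises_solution : Prop := (∀ (s : String), Dom_solution s → Raises_solution s → ¬ Pre_solution s) ∧ (Dom_solution (pvRaiseWitness_solution) ∧ Raises_solution (pvRaiseWitness_solution) ∧ solution_alt (pvRaiseWitness_solution) = pvRaiseWitnessOut_solution)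

-- ===== LEMMAS AND PROOFS =====

-- B's inner loop leaves the list untouched when the counters are already balanced
theorem innerB_bal (first : Char) (sm : Int) (l : List Char) : innerB first sm sm l = l := by
  cases l <;> simp [innerB]

-- Main invariant pair, by strong induction on the list length:
-- (segment start) A's fold from a balanced state (cnt1 = cnt2 = c) equals B's outer loop;
-- (mid-segment)   A's fold from state (c+sm, c+df), sm ≠ df, equals B's outer loop on
--                 what B's inner loop leaves of the list.
theorem fold_outer_both (n : Nat) :
    (∀ l : List Char, l.length ≤ n → ∀ (c a : Int) (x : Char),
      (l.foldl stepA (a, c, c, x)).1 = outerB l a) ∧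
    (∀ l : List Char, l.length ≤ n → ∀ (c sm df a : Int) (x : Char), sm ≠ df →
      (l.foldl stepA (a, c + sm, c + df, x)).1 = outerB (innerB x sm df l) a) := by
  induction n with
  | zero =>
    constructor <;> intro l hl <;>
      (have : l = [] := List.length_eq_zero_iff.mp (Nat.le_zero.mp hl); subst this) <;>
      intros <;> simp [outerB, innerB]
  | succ n ih =>
    constructor
    · intro l hl c a x
      match l with
      | [] => simp [outerB]
      | i :: rest =>
        have hr : rest.length ≤ n := by simpa using Nat.succ_le_succ_iff.mp hl
        rw [outerB]
        simp only [List.foldl_cons, stepA, beq_self_eq_true]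
        have := ih.2 rest hr c 1 0 (a + 1) i (by decide)
        simpa [add_comm] using this
    · intro l hl c sm df a x hne
      match l with
      | [] => simp [outerB, innerB]
      | i :: rest =>
        have hr : rest.length ≤ n := by simpa using Nat.succ_le_succ_iff.mp hl
        have hcc : ((c + sm == c + df) = false) := by
          simp only [beq_eq_false_iff_ne]; intro h; exact hne (by omega)
        rw [innerB, if_neg (by simpa using hne)]
        simp only [List.foldl_cons, stepA, hcc, if_false, Bool.false_eq_true]
        by_cases hix : i = x
        · subst hix
          simp only [beq_self_eq_true, if_true]
          by_cases heq : sm + 1 = df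
          · subst heq
            rw [innerB_bal]
            have := ih.1 rest hr (c + (sm + 1)) a i
            simpa [add_assoc] using this
          · have := ih.2 rest hr c (sm + 1) df a i heq
            simpa [add_assoc] using this
        · rw [if_neg (by simpa using hix), if_neg (by simpa using hix)]
          by_cases heq : sm = df + 1
          · subst heq
            rw [innerB_bal]
            have := ih.1 rest hr (c + (df + 1)) a x
            simpa [add_assoc] using this
          · have := ih.2 rest hr c sm (df + 1) a x heq
            simpa [add_assoc] using this

-- ===== VERDICT (by name: the statement is the Claim_ definition above) =====
theorem solution_spec : Claim_equal_solution := by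
  intro s _ hpre
  unfold Spec_solution solution solution_alt
  match hl : s.toList with
  | [] => exact absurd hl hpre
  | x0 :: rest =>
    have hget : PySem.Str.pyGet? s 0 = some x0 := by
      have := PySem.Str.pyGet?_natCast (s := s) (n := 0)
      simp only [Nat.cast_zero] at this
      rw [this, hl]; rfl
    rw [hget]
    show (List.foldl stepA (0, 0, 0, x0) (x0 :: rest)).1 = outerB (x0 :: rest) 0
    rw [outerB]
    simp only [List.foldl_cons, stepA, beq_self_eq_true]
    have := (fold_outer_both rest.length).2 rest le_rfl 0 1 0 1 x0 (by decide)
    simpa using this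

theorem solution_raises : Claim_raises_solution := by
  unfold Claim_raises_solution
  refine ⟨fun s _ hr hp => hp hr, by decide, by decide, ?_⟩
  simp [solution_alt, outerB, pvRaiseWitness_solution, pvRaiseWitnessOut_solution]

-- self-check: the raise-witness output recorded above is B's value at the witness
theorem pvRaiseWitnessOut_ok :
    solution_alt pvRaiseWitness_solution = pvRaiseWitnessOut_solution :=
  solution_raises.2.2.2
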